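-- pv_equiv track=rewrite | github.com/MartMbithi/DFIR_AI | intelligence/attack_channel_classifier.py | classify_attack_channels
-- ===== SOURCE A (Python) =====
-- ATTACK_CHANNELS = {
--     "web": ["http","https","waf","sql","sqli","lfi","xss","path traversal"],
--     "authentication": ["login failed","authentication","password","ssh","rdp","vpn","brute force","mfa"],
--     "network": ["port scan","syn","icmp","ldap","smb","dns","smtp"],
--     "endpoint": ["process","binary","execution","service","registry","powershell","cmd.exe"],
--     "cloud": ["iam","assume role","token","api","cloudtrail","azure","gcp"]
-- }
--
-- def classify_attack_channels(triaged):
--     channels = {k: False for k in ATTACK_CHANNELS}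
--     for a in triaged:
--         s = a.get("content_summary","").lower()
--         for ch, keys in ATTACK_CHANNELS.items():
--             if any(k in s for k in keys):
--                 channels[ch] = True
--     return channels
-- ===== SOURCE B (Python) =====
-- # B: flat keyword->channel table + one combined '\n'-joined lowered blob;
-- # collect the set of channels whose keyword occurs in the blob, then read flags off that set.
-- KEYWORD_CHANNEL = [
--     ("http", "web"), ("https", "web"), ("waf", "web"), ("sql", "web"),
--     ("sqli", "web"), ("lfi", "web"), ("xss", "web"), ("path traversal", "web"),
--     ("login failed", "authentication"), ("authentication", "authentication"),
--     ("password", "authentication"), ("ssh", "authentication"), ("rdp", "authentication"),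
--     ("vpn", "authentication"), ("brute force", "authentication"), ("mfa", "authentication"),
--     ("port scan", "network"), ("syn", "network"), ("icmp", "network"),
--     ("ldap", "network"), ("smb", "network"), ("dns", "network"), ("smtp", "network"),
--     ("process", "endpoint"), ("binary", "endpoint"), ("execution", "endpoint"),
--     ("service", "endpoint"), ("registry", "endpoint"), ("powershell", "endpoint"),
--     ("cmd.exe", "endpoint"),
--     ("iam", "cloud"), ("assume role", "cloud"), ("token", "cloud"), ("api", "cloud"),
--     ("cloudtrail", "cloud"), ("azure", "cloud"), ("gcp", "cloud"),
-- ]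
-- CHANNELS = ["web", "authentication", "network", "endpoint", "cloud"]
--
-- def classify_attack_channels(triaged):
--     combined = "\n".join(a.get("content_summary", "").lower() for a in triaged)
--     hit = {ch for kw, ch in KEYWORD_CHANNEL if kw in combined}
--     return {ch: ch in hit for ch in CHANNELS}
-- ===== Notes on version B (the rewrite author's own statement) =====
-- stated objective: alternative
-- what changed: A loops over alerts and, per alert, re-tests every channel's keyword list while mutating a channel->flag dict; B instead joins all lowered summaries into one '\n'-separated blob (newline occurs in no keyword, so no match can span two summaries), scans a flat keyword->channel table once against that blob collecting the set of hit channels, and reads each flag off that set.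
import Mathlib
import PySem

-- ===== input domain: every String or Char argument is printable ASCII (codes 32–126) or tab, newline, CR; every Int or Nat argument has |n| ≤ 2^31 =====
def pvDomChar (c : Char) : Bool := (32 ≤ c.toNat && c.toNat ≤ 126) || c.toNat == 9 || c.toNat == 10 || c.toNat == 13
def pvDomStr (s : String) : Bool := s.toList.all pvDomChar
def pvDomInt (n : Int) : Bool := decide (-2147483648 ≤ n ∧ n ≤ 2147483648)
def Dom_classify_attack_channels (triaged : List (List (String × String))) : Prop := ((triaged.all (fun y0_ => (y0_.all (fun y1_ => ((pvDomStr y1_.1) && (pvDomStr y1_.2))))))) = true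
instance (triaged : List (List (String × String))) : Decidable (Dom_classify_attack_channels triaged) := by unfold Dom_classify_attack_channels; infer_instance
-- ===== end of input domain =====

-- B scans a flat keyword->channel table against one '\n'-joined lowered blob and collects the
-- set of hit channels, instead of re-testing every channel's keyword list per alert while
-- mutating a flag dict (objective: alternative).

-- ===== PORT A =====
-- module constant ATTACK_CHANNELS (items in insertion order), as A reads it
def pvP1 : String × List String := ("web", ["http","https","waf","sql","sqli","lfi","xss","path traversal"])
def pvP2 : String × List String := ("authentication", ["login failed","authentication","password","ssh","rdp","vpn","brute force","mfa"])
def pvP3 : String × List String := ("network", ["port scan","syn","icmp","ldap","smb","dns","smtp"])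
def pvP4 : String × List String := ("endpoint", ["process","binary","execution","service","registry","powershell","cmd.exe"])
def pvP5 : String × List String := ("cloud", ["iam","assume role","token","api","cloudtrail","azure","gcp"])
def pvAC : List (String × List String) := [pvP1, pvP2, pvP3, pvP4, pvP5]

-- a.get("content_summary","").lower()
def pvLowSum (a : List (String × String)) : String :=
  PySem.Str.lower (PySem.Dict.getD (PySem.Dict.mk a) "content_summary" "")

def classify_attack_channels (triaged : List (List (String × String))) : List (String × Bool) :=
  let channels : PySem.Dict String Bool := PySem.Dict.mk (pvAC.map (fun p => (p.1, false)))
  let final := triaged.foldl (fun channels a =>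
    let s := pvLowSum a
    pvAC.foldl (fun channels p =>
      if p.2.any (fun k => PySem.Str.isIn k s) then channels.insert p.1 true else channels)
      channels) channels
  final.items

-- ===== PORT B =====
-- B's module constants: the flat KEYWORD_CHANNEL table and the CHANNELS list
def pvKW : List (String × String) :=
  [("http", "web"), ("https", "web"), ("waf", "web"), ("sql", "web"),
   ("sqli", "web"), ("lfi", "web"), ("xss", "web"), ("path traversal", "web"),
   ("login failed", "authentication"), ("authentication", "authentication"),
   ("password", "authentication"), ("ssh", "authentication"), ("rdp", "authentication"),
   ("vpn", "authentication"), ("brute force", "authentication"), ("mfa", "authentication"),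
   ("port scan", "network"), ("syn", "network"), ("icmp", "network"),
   ("ldap", "network"), ("smb", "network"), ("dns", "network"), ("smtp", "network"),
   ("process", "endpoint"), ("binary", "endpoint"), ("execution", "endpoint"),
   ("service", "endpoint"), ("registry", "endpoint"), ("powershell", "endpoint"),
   ("cmd.exe", "endpoint"),
   ("iam", "cloud"), ("assume role", "cloud"), ("token", "cloud"), ("api", "cloud"),
   ("cloudtrail", "cloud"), ("azure", "cloud"), ("gcp", "cloud")]
def pvCH : List String := ["web", "authentication", "network", "endpoint", "cloud"]

def classify_attack_channels_alt (triaged : List (List (String × String))) : List (String × Bool) :=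
  let combined := PySem.Str.join "\n"
    (triaged.map (fun a => PySem.Str.lower (PySem.Dict.getD (PySem.Dict.mk a) "content_summary" "")))
  let hit : PySem.Set String :=
    PySem.Set.ofList ((pvKW.filter (fun p => PySem.Str.isIn p.1 combined)).map (fun p => p.2))
  pvCH.map (fun c => (c, PySem.Set.contains hit c))

-- ===== PRECONDITION & SPEC =====
def Spec_classify_attack_channels (triaged : List (List (String × String))) (out : List (String × Bool)) : Prop := out = classify_attack_channels_alt triaged
instance (triaged : List (List (String × String))) (out : List (String × Bool)) : Decidable (Spec_classify_attack_channels triaged out) := by unfold Spec_classify_attack_channels; infer_instance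

-- ===== CLAIM (what is proved, stated in full; the proofs are below) =====
def Claim_equal_classify_attack_channels : Prop := ∀ (triaged : List (List (String × String))), Dom_classify_attack_channels triaged → Spec_classify_attack_channels triaged (classify_attack_channels triaged)

-- ===== LEMMAS AND PROOFS =====

-- whether a channel's keywords hit alert a
def pvCond (p : String × List String) (a : List (String × String)) : Bool :=
  p.2.any (fun k => PySem.Str.isIn k (pvLowSum a))

-- a prefix not containing c stops before c
theorem pv_prefix_append_cons {l x y : List Char} {c : Char} (hc : c ∉ l)
    (h : l <+: x ++ c :: y) : l <+: x := by
  induction l generalizing x with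
  | nil => exact List.nil_prefix
  | cons d l' ih =>
    cases x with
    | nil =>
      rcases List.cons_prefix_cons.mp h with ⟨rfl, _⟩
      exact absurd List.mem_cons_self hc
    | cons a x' =>
      rcases List.cons_prefix_cons.mp h with ⟨rfl, h'⟩
      exact List.cons_prefix_cons.mpr ⟨rfl, ih (fun m => hc (List.mem_cons_of_mem _ m)) h'⟩

-- an infix not containing c lies on one side of c
theorem pv_infix_append_cons {l x y : List Char} {c : Char} (hc : c ∉ l) :
    l <:+: x ++ c :: y ↔ l <:+: x ∨ l <:+: y := by
  constructor
  · intro h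
    induction x with
    | nil =>
      rcases List.infix_cons_iff.mp h with hp | hi
      · cases l with
        | nil => exact Or.inl (List.nil_infix)
        | cons d l' =>
          rcases List.cons_prefix_cons.mp hp with ⟨rfl, _⟩
          exact absurd List.mem_cons_self hc
      · exact Or.inr hi
    | cons a x' ih =>
      rcases List.infix_cons_iff.mp h with hp | hi
      · exact Or.inl (pv_prefix_append_cons hc hp).isInfix
      · rcases ih hi with h1 | h2
        · exact Or.inl (h1.trans ⟨[a], [], by simp⟩)
        · exact Or.inr h2
  · rintro (h | h)
    · exact h.trans ⟨[], c :: y, by simp⟩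
    · exact h.trans ⟨x ++ [c], [], by simp⟩

-- Chars-level: a '\n'-free nonempty needle hits the '\n'-joined list iff it hits some part
theorem pv_isIn_joinChars (k : List Char) (hk : k ≠ []) (hc : ('\n' : Char) ∉ k)
    (parts : List (List Char)) :
    PySem.Chars.isIn k (PySem.Chars.join ['\n'] parts) = parts.any (fun p => PySem.Chars.isIn k p) := by
  induction parts with
  | nil =>
    simp [PySem.Chars.join_nil]
    rw [(PySem.Chars.isIn_eq_false_iff _ _)]
    intro h
    exact hk (List.eq_nil_of_infix_nil h)
  | cons p rest ih =>
    cases rest with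
    | nil => simp [PySem.Chars.join_singleton]
    | cons q r =>
      rw [PySem.Chars.join_cons_cons, List.append_assoc, List.singleton_append]
      have step : PySem.Chars.isIn k (p ++ '\n' :: PySem.Chars.join ['\n'] (q :: r)) =
          (PySem.Chars.isIn k p || PySem.Chars.isIn k (PySem.Chars.join ['\n'] (q :: r))) := by
        by_cases h : k <:+: p ++ '\n' :: PySem.Chars.join ['\n'] (q :: r)
        · rcases (pv_infix_append_cons hc).mp h with h1 | h2
          · rw [(PySem.Chars.isIn_iff_infix _ _).mpr h, (PySem.Chars.isIn_iff_infix _ _).mpr h1]; simp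
          · rw [(PySem.Chars.isIn_iff_infix _ _).mpr h, (PySem.Chars.isIn_iff_infix _ _).mpr h2]; simp
        · rw [(PySem.Chars.isIn_eq_false_iff _ _).mpr h,
            (PySem.Chars.isIn_eq_false_iff _ _).mpr (fun h1 => h ((pv_infix_append_cons hc).mpr (Or.inl h1))),
            (PySem.Chars.isIn_eq_false_iff _ _).mpr (fun h2 => h ((pv_infix_append_cons hc).mpr (Or.inr h2)))]
          simp
      rw [step, ih]
      simp

-- String-level corollary
theorem pv_isIn_join (k : String) (hk : k.toList ≠ []) (hc : ('\n' : Char) ∉ k.toList)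
    (ss : List String) :
    PySem.Str.isIn k (PySem.Str.join "\n" ss) = ss.any (fun s => PySem.Str.isIn k s) := by
  have hnl : ("\n" : String).toList = ['\n'] := rfl
  have h := pv_isIn_joinChars k.toList hk hc (ss.map String.toList)
  simp only [List.any_map, Function.comp_def] at h
  simp [hnl, h]

-- any distributes over || pointwise
theorem pv_any_or {β : Type} (ts : List β) (p q : β → Bool) :
    ts.any (fun t => p t || q t) = (ts.any p || ts.any q) := by
  induction ts with
  | nil => simp
  | cons a ts ih => cases h1 : p a <;> cases h2 : q a <;> simp [List.any_cons, ih, h1, h2]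

-- swap the two anys
theorem pv_any_swap {α β : Type} (ks : List α) (ts : List β) (f : α → β → Bool) :
    ks.any (fun k => ts.any (f k)) = ts.any (fun t => ks.any (fun k => f k t)) := by
  induction ks with
  | nil => simp
  | cons k ks ih => simp [ih, pv_any_or]

-- one channel: scanning the joined blob = scanning per alert
theorem pv_channel (ks : List String)
    (hk : ∀ k ∈ ks, k.toList ≠ [] ∧ ('\n' : Char) ∉ k.toList)
    (t : List (List (String × String))) :
    ks.any (fun k => PySem.Str.isIn k (PySem.Str.join "\n" (t.map (fun a => pvLowSum a)))) =
      t.any (fun a => ks.any (fun k => PySem.Str.isIn k (pvLowSum a))) := by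
  have h1 : ks.any (fun k => PySem.Str.isIn k (PySem.Str.join "\n" (t.map (fun a => pvLowSum a)))) =
      ks.any (fun k => (t.map (fun a => pvLowSum a)).any (fun s => PySem.Str.isIn k s)) := by
    induction ks with
    | nil => simp
    | cons k ks ih =>
      simp only [List.any_cons]
      rw [pv_isIn_join k (hk k List.mem_cons_self).1 (hk k List.mem_cons_self).2,
        ih (fun k m => hk k (List.mem_cons_of_mem _ m))]
  rw [h1, pv_any_swap]
  simp [List.any_map, Function.comp_def]

-- B side: membership of c in the seconds of the filtered table = an any over the table
theorem pv_beq_comm (a b : String) : (a == b) = (b == a) := by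
  cases hx : a == b <;> cases hy : b == a <;> simp_all

theorem pv_contains_snd_filter (c : String) (l : List (String × String)) (pred : String × String → Bool) :
    ((l.filter pred).map (fun p => p.2)).contains c =
      l.any (fun p => p.2 == c && pred p) := by
  induction l with
  | nil => rfl
  | cons p l ih =>
    rw [List.filter_cons, List.any_cons]
    cases h : pred p
    · rw [if_neg (by simp), Bool.and_false, Bool.false_or, ih]
    · rw [if_pos rfl, List.map_cons, List.contains_cons, Bool.and_true, ih, pv_beq_comm]

-- set(...) keeps membership
theorem pv_setContains_ofList (xs : List String) (c : String) :
    PySem.Set.contains (PySem.Set.ofList xs) c = xs.contains c := by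
  by_cases h : c ∈ xs <;>
    simp [PySem.Set.contains_eq_listContains, PySem.Set.mem_ofList, h]

-- the five single-key updates on the literal channel dict
theorem pv_ins1 (b1 b2 b3 b4 b5 : Bool) (c : Bool) :
    (if c then (PySem.Dict.mk [("web", b1), ("authentication", b2), ("network", b3), ("endpoint", b4), ("cloud", b5)]).insert "web" true
     else PySem.Dict.mk [("web", b1), ("authentication", b2), ("network", b3), ("endpoint", b4), ("cloud", b5)]) =
    PySem.Dict.mk [("web", b1 || c), ("authentication", b2), ("network", b3), ("endpoint", b4), ("cloud", b5)] := by
  cases c <;> simp [PySem.Dict.insert, PySem.Dict.contains]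
theorem pv_ins2 (b1 b2 b3 b4 b5 : Bool) (c : Bool) :
    (if c then (PySem.Dict.mk [("web", b1), ("authentication", b2), ("network", b3), ("endpoint", b4), ("cloud", b5)]).insert "authentication" true
     else PySem.Dict.mk [("web", b1), ("authentication", b2), ("network", b3), ("endpoint", b4), ("cloud", b5)]) =
    PySem.Dict.mk [("web", b1), ("authentication", b2 || c), ("network", b3), ("endpoint", b4), ("cloud", b5)] := by
  cases c <;> simp [PySem.Dict.insert, PySem.Dict.contains]
theorem pv_ins3 (b1 b2 b3 b4 b5 : Bool) (c : Bool) :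
    (if c then (PySem.Dict.mk [("web", b1), ("authentication", b2), ("network", b3), ("endpoint", b4), ("cloud", b5)]).insert "network" true
     else PySem.Dict.mk [("web", b1), ("authentication", b2), ("network", b3), ("endpoint", b4), ("cloud", b5)]) =
    PySem.Dict.mk [("web", b1), ("authentication", b2), ("network", b3 || c), ("endpoint", b4), ("cloud", b5)] := by
  cases c <;> simp [PySem.Dict.insert, PySem.Dict.contains]
theorem pv_ins4 (b1 b2 b3 b4 b5 : Bool) (c : Bool) :
    (if c then (PySem.Dict.mk [("web", b1), ("authentication", b2), ("network", b3), ("endpoint", b4), ("cloud", b5)]).insert "endpoint" true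
     else PySem.Dict.mk [("web", b1), ("authentication", b2), ("network", b3), ("endpoint", b4), ("cloud", b5)]) =
    PySem.Dict.mk [("web", b1), ("authentication", b2), ("network", b3), ("endpoint", b4 || c), ("cloud", b5)] := by
  cases c <;> simp [PySem.Dict.insert, PySem.Dict.contains]
theorem pv_ins5 (b1 b2 b3 b4 b5 : Bool) (c : Bool) :
    (if c then (PySem.Dict.mk [("web", b1), ("authentication", b2), ("network", b3), ("endpoint", b4), ("cloud", b5)]).insert "cloud" true
     else PySem.Dict.mk [("web", b1), ("authentication", b2), ("network", b3), ("endpoint", b4), ("cloud", b5)]) =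
    PySem.Dict.mk [("web", b1), ("authentication", b2), ("network", b3), ("endpoint", b4), ("cloud", b5 || c)] := by
  cases c <;> simp [PySem.Dict.insert, PySem.Dict.contains]

-- A's loop, with the channel dict abstracted over its five boolean values
theorem pv_A_loop (ts : List (List (String × String))) (b1 b2 b3 b4 b5 : Bool) :
    ts.foldl (fun channels a =>
      pvAC.foldl (fun channels p =>
        if p.2.any (fun k => PySem.Str.isIn k (pvLowSum a)) then channels.insert p.1 true else channels)
        channels)
      (PySem.Dict.mk [("web", b1), ("authentication", b2), ("network", b3), ("endpoint", b4), ("cloud", b5)]) =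
    PySem.Dict.mk [("web", b1 || ts.any (pvCond pvP1)),
      ("authentication", b2 || ts.any (pvCond pvP2)),
      ("network", b3 || ts.any (pvCond pvP3)),
      ("endpoint", b4 || ts.any (pvCond pvP4)),
      ("cloud", b5 || ts.any (pvCond pvP5))] := by
  induction ts generalizing b1 b2 b3 b4 b5 with
  | nil => simp
  | cons a ts ih =>
    rw [List.foldl_cons]
    have hstep : pvAC.foldl (fun channels p =>
        if p.2.any (fun k => PySem.Str.isIn k (pvLowSum a)) then channels.insert p.1 true else channels)
        (PySem.Dict.mk [("web", b1), ("authentication", b2), ("network", b3), ("endpoint", b4), ("cloud", b5)]) =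
        PySem.Dict.mk [("web", b1 || pvCond pvP1 a), ("authentication", b2 || pvCond pvP2 a),
          ("network", b3 || pvCond pvP3 a), ("endpoint", b4 || pvCond pvP4 a),
          ("cloud", b5 || pvCond pvP5 a)] := by
      simp only [pvAC, List.foldl_cons, List.foldl_nil]
      rw [show (pvP1.1 : String) = "web" from rfl, show (pvP2.1 : String) = "authentication" from rfl,
        show (pvP3.1 : String) = "network" from rfl, show (pvP4.1 : String) = "endpoint" from rfl,
        show (pvP5.1 : String) = "cloud" from rfl,
        pv_ins1, pv_ins2, pv_ins3, pv_ins4, pv_ins5]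
      rfl
    rw [hstep, ih]
    simp [Bool.or_assoc, List.any_cons]

-- B's flag for a concrete channel c reduces to that channel's keyword scan of the blob
theorem pv_B_channel (combined : String) (c : String) (ks : List String)
    (h : pvKW.any (fun p => p.2 == c && (fun q : String × String => PySem.Str.isIn q.1 combined) p) =
         ks.any (fun k => PySem.Str.isIn k combined)) :
    PySem.Set.contains
      (PySem.Set.ofList ((pvKW.filter (fun p => PySem.Str.isIn p.1 combined)).map (fun p => p.2))) c =
    ks.any (fun k => PySem.Str.isIn k combined) := by
  rw [pv_setContains_ofList, pv_contains_snd_filter, h]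

-- ===== VERDICT (by name: the statement is the Claim_ definition above) =====
theorem classify_attack_channels_spec : Claim_equal_classify_attack_channels := by
  intro t _
  unfold Spec_classify_attack_channels
  simp only [classify_attack_channels, classify_attack_channels_alt]
  have hinit : PySem.Dict.mk (pvAC.map (fun p => (p.1, false))) =
      PySem.Dict.mk [("web", false), ("authentication", false), ("network", false), ("endpoint", false), ("cloud", false)] := rfl
  have hlow : (fun a : List (String × String) =>
      PySem.Str.lower (PySem.Dict.getD (PySem.Dict.mk a) "content_summary" "")) = fun a => pvLowSum a := rfl
  rw [hinit, pv_A_loop, hlow]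
  have hb1 := pv_B_channel (PySem.Str.join "\n" (t.map (fun a => pvLowSum a))) "web" pvP1.2
    (by simp [pvKW, pvP1, List.any_cons])
  have hb2 := pv_B_channel (PySem.Str.join "\n" (t.map (fun a => pvLowSum a))) "authentication" pvP2.2
    (by simp [pvKW, pvP2, List.any_cons])
  have hb3 := pv_B_channel (PySem.Str.join "\n" (t.map (fun a => pvLowSum a))) "network" pvP3.2
    (by simp [pvKW, pvP3, List.any_cons])
  have hb4 := pv_B_channel (PySem.Str.join "\n" (t.map (fun a => pvLowSum a))) "endpoint" pvP4.2
    (by simp [pvKW, pvP4, List.any_cons])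
  have hb5 := pv_B_channel (PySem.Str.join "\n" (t.map (fun a => pvLowSum a))) "cloud" pvP5.2
    (by simp [pvKW, pvP5, List.any_cons])
  have h1 := pv_channel pvP1.2 (by decide) t
  have h2 := pv_channel pvP2.2 (by decide) t
  have h3 := pv_channel pvP3.2 (by decide) t
  have h4 := pv_channel pvP4.2 (by decide) t
  have h5 := pv_channel pvP5.2 (by decide) t
  simp only [pvCH, List.map_cons, List.map_nil, hb1, hb2, hb3, hb4, hb5, h1, h2, h3, h4, h5]
  simp
  exact ⟨rfl, rfl, rfl, rfl, rfl⟩
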